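-- pv_equiv track=rewrite | github.com/pratikgl/CompBio | MaxParsiomony (1).py | showinform
-- ===== SOURCE A (Python) =====
-- def showinform(seqlist):
--
--     seqlength = len(seqlist[0])
--     informtracker = [] # tracks the locations of informative sites in the sequences
--     for x in range(seqlength): # for each index of the sequences...
--         countA = 0
--         countC = 0
--         countG = 0
--         countT = 0
--         # iterate over the sequences and count the number of appearances for each nucleotide
--         for seq in seqlist:
--             if (seq[x] == 'A'):
--                 countA += 1
--             elif (seq[x] == 'C'):
--                 countC += 1
--             elif (seq[x] == 'G'):
--                 countG += 1
--             elif (seq[x] == 'T'):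
--                 countT += 1
--         # an informative site has two or more appearances of at least two different nucleotides
--         if ((countA >= 2 and countC >= 2) or
--             (countA >= 2 and countG >= 2) or
--             (countA >= 2 and countT >= 2) or
--             (countC >= 2 and countG >= 2) or
--             (countC >= 2 and countT >= 2) or
--             (countG >= 2 and countT >= 2)):
--             informtracker.append(1) # represent informative sites with a 1 in the tracker
--         else:
--             informtracker.append(0) # represent non-informative sites with a 0
--
--     informseqlist = []
--     # make a list of the new, trimmed down sequences
--     for seq in seqlist:
--         informseq = ''
--         for x in range(seqlength):
--             if (informtracker[x] == 1):
--                 informseq += seq[x]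
--         informseqlist.append(informseq)
--
--     return informseqlist
-- ===== SOURCE B (Python) =====
-- def showinform(seqlist):
--     seqlength = len(seqlist[0])
--     keep = []  # indices of informative columns
--     for x in range(seqlength):
--         col = [seq[x] for seq in seqlist]
--         # a nucleotide is "duplicated" iff some occurrence of it has an earlier equal
--         # occurrence in the column; a column is informative iff >= 2 distinct duplicated ones
--         dups = {c for i, c in enumerate(col) if c in 'ACGT' and c in col[:i]}
--         if len(dups) >= 2:
--             keep.append(x)
--     return [''.join(seq[i] for i in keep) for seq in seqlist]
-- ===== Notes on version B (the rewrite author's own statement) =====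
-- stated objective: alternative
-- what changed: B drops A's four per-nucleotide counters and six-way pairwise AND/OR test entirely: it transposes each column into a list, detects duplicated nucleotides by 'this occurrence has an earlier equal occurrence' (a membership test against the column prefix, no counting), collects them into a set, and keeps the column iff that set has at least two elements; trimmed sequences are then built by joining the kept indices instead of re-scanning every column against a 0/1 tracker.
import Mathlib
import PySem

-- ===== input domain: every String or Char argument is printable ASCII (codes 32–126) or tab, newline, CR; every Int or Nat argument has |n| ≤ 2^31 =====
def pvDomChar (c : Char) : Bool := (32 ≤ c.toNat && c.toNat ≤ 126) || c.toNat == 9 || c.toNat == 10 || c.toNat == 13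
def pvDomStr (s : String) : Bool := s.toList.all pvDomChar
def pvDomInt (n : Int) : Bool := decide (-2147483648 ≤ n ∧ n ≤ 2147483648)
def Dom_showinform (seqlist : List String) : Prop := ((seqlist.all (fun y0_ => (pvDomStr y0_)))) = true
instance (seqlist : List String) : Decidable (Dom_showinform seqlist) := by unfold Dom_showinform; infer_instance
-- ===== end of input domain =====

-- B replaces A's four counters and six-way pairwise OR by a duplicate-detection pass: it
-- transposes each column, collects the set of nucleotides that have an occurrence with an
-- earlier equal occurrence, and keeps the column iff that set has at least two elements.
-- (objective: alternative)

-- ===== PORT A =====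
-- A's inner counting loop over the sequences at column x (the four counters as a tuple)
def pvNucCounts (seqlist : List String) (x : Int) : Int × Int × Int × Int :=
  seqlist.foldl (fun c seq =>
    let ch := (PySem.Str.pyGet? seq x).getD ' '   -- seq[x]; none = IndexError, excluded by Pre_
    if ch = 'A' then (c.1 + 1, c.2.1, c.2.2.1, c.2.2.2)
    else if ch = 'C' then (c.1, c.2.1 + 1, c.2.2.1, c.2.2.2)
    else if ch = 'G' then (c.1, c.2.1, c.2.2.1 + 1, c.2.2.2)
    else if ch = 'T' then (c.1, c.2.1, c.2.2.1, c.2.2.2 + 1)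
    else c) (0, 0, 0, 0)

-- A's six-way pairwise condition (Python's `and`/`or` of `>=` comparisons, a bool)
def pvSixWay (c : Int × Int × Int × Int) : Bool :=
  (decide (c.1 ≥ 2) && decide (c.2.1 ≥ 2)) ||
  (decide (c.1 ≥ 2) && decide (c.2.2.1 ≥ 2)) ||
  (decide (c.1 ≥ 2) && decide (c.2.2.2 ≥ 2)) ||
  (decide (c.2.1 ≥ 2) && decide (c.2.2.1 ≥ 2)) ||
  (decide (c.2.1 ≥ 2) && decide (c.2.2.2 ≥ 2)) ||
  (decide (c.2.2.1 ≥ 2) && decide (c.2.2.2 ≥ 2))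

def showinform (seqlist : List String) : List String :=
  let seqlength : Int := PySem.Str.len (PySem.List.pyGetD seqlist 0 "")  -- len(seqlist[0]); IndexError on [], excluded by Pre_
  let informtracker : List Int :=
    (PySem.List.pyRange 0 seqlength 1).foldl (fun tr x =>
      if pvSixWay (pvNucCounts seqlist x) then tr ++ [(1 : Int)] else tr ++ [(0 : Int)]) []
  seqlist.foldl (fun out seq =>
    let informseq : List Char :=
      (PySem.List.pyRange 0 seqlength 1).foldl (fun s x =>
        if PySem.List.pyGetD informtracker x 0 == 1
        then s ++ [(PySem.Str.pyGet? seq x).getD ' '] else s) []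
    out ++ [String.ofList informseq]) []

-- ===== PORT B =====
-- B's duplicate set for a column: {c for i, c in enumerate(col) if c in 'ACGT' and c in col[:i]}
-- (p.2 ∈ "ACGT".toList is exact for `c in 'ACGT'` since c is a single character)
def pvDupsList (col : List Char) : List Char :=
  (PySem.List.enumerate col 0).filterMap (fun p =>
    if p.2 ∈ "ACGT".toList ∧ p.2 ∈ PySem.List.slice col none (some p.1) then some p.2 else none)

def showinform_alt (seqlist : List String) : List String :=
  let seqlength : Int := PySem.Str.len (PySem.List.pyGetD seqlist 0 "")  -- len(seqlist[0]); IndexError on [], excluded by Pre_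
  let keep : List Int :=
    (PySem.List.pyRange 0 seqlength 1).foldl (fun acc x =>
      let col : List Char := seqlist.map (fun seq => (PySem.Str.pyGet? seq x).getD ' ')  -- seq[x]; IndexError excluded by Pre_
      if decide (PySem.Set.len (PySem.Set.ofList (pvDupsList col)) ≥ 2) then acc ++ [x] else acc) []
  seqlist.map (fun seq => String.ofList (keep.map (fun i => (PySem.Str.pyGet? seq i).getD ' ')))

-- ===== PRECONDITION & SPEC =====
-- Pre_ excludes exactly the inputs on which Python A raises IndexError: the empty list
-- (seqlist[0]) and lists containing a sequence shorter than the first (seq[x]).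
def Pre_showinform (seqlist : List String) : Prop :=
  seqlist ≠ [] ∧ ∀ s ∈ seqlist, (seqlist.headD "").toList.length ≤ s.toList.length
instance (seqlist : List String) : Decidable (Pre_showinform seqlist) := by unfold Pre_showinform; infer_instance

def pvWitness_showinform : List String := ["ACAT", "ACGG", "AGTT", "TCAG"]

def Spec_showinform (seqlist : List String) (out : List String) : Prop := out = showinform_alt seqlist
instance (seqlist : List String) (out : List String) : Decidable (Spec_showinform seqlist out) := by unfold Spec_showinform; infer_instance

-- ===== CLAIM (what is proved, stated in full; the proofs are below) =====
def Claim_equal_showinform : Prop := ∀ (seqlist : List String), Dom_showinform seqlist → Pre_showinform seqlist → Spec_showinform seqlist (showinform seqlist)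

-- ===== LEMMAS AND PROOFS =====

-- the character both ports read at column x of seq (total form of seq[x])
def pvColChar (x : Int) (seq : String) : Char := (PySem.Str.pyGet? seq x).getD ' '

-- A's four counters are the occurrence counts of 'A','C','G','T' in column x
lemma pvNucCounts_foldl (x : Int) (L : List String) (c : Int × Int × Int × Int) :
    L.foldl (fun c seq =>
      let ch := (PySem.Str.pyGet? seq x).getD ' '
      if ch = 'A' then (c.1 + 1, c.2.1, c.2.2.1, c.2.2.2)
      else if ch = 'C' then (c.1, c.2.1 + 1, c.2.2.1, c.2.2.2)
      else if ch = 'G' then (c.1, c.2.1, c.2.2.1 + 1, c.2.2.2)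
      else if ch = 'T' then (c.1, c.2.1, c.2.2.1, c.2.2.2 + 1)
      else c) c =
    (c.1 + ((L.map (pvColChar x)).count 'A' : Int), c.2.1 + ((L.map (pvColChar x)).count 'C' : Int),
     c.2.2.1 + ((L.map (pvColChar x)).count 'G' : Int), c.2.2.2 + ((L.map (pvColChar x)).count 'T' : Int)) := by
  induction L generalizing c with
  | nil => simp
  | cons s L ih =>
    simp only [List.foldl_cons]
    rw [ih, List.map_cons]
    have hcc : pvColChar x s = (PySem.Str.pyGet? s x).getD ' ' := rfl
    rw [← hcc]
    generalize pvColChar x s = ch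
    by_cases h1 : ch = 'A' <;> by_cases h2 : ch = 'C' <;> by_cases h3 : ch = 'G' <;>
      by_cases h4 : ch = 'T' <;>
      simp [h1, h2, h3, h4, Prod.ext_iff] <;> omega

-- "some occurrence of c has an earlier equal occurrence" ↔ "c occurs at least twice",
-- generalized over a proposition b standing for "c was seen before this list"
lemma pv_seen_aux (c : Char) (l : List Char) (b : Prop) [Decidable b] :
    (∃ (k : Nat) (_ : k < l.length), l[k] = c ∧ (b ∨ c ∈ l.take k)) ↔
      (b ∧ c ∈ l) ∨ 2 ≤ l.count c := by
  induction l generalizing b with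
  | nil => simp
  | cons a t ih =>
    have hcc : (a :: t).count c = t.count c + if a = c then 1 else 0 := by
      rw [List.count_cons]
      by_cases h : a = c
      · simp [h]
      · simp [h]
    constructor
    · rintro ⟨k, hk, hek, hmem⟩
      match k, hk, hek, hmem with
      | 0, _, hek, hmem =>
        simp only [List.take_zero, List.not_mem_nil, or_false] at hmem
        simp only [List.getElem_cons_zero] at hek
        exact Or.inl ⟨hmem, by simp [← hek]⟩
      | (j+1), hk, hek, hmem =>
        simp only [List.length_cons, Nat.add_lt_add_iff_right] at hk
        simp only [List.getElem_cons_succ] at hek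
        simp only [List.take_succ_cons, List.mem_cons] at hmem
        have : (∃ (k : Nat) (_ : k < t.length), t[k] = c ∧ ((b ∨ c = a) ∨ c ∈ t.take k)) :=
          ⟨j, hk, hek, by tauto⟩
        rw [ih] at this
        have hct : c ∈ t := by
          rcases this with ⟨_, h⟩ | h
          · exact h
          · exact List.count_pos_iff.mp (by omega)
        rcases this with ⟨hba, _⟩ | h2
        · rcases hba with hb | hca
          · exact Or.inl ⟨hb, by simp [hct]⟩
          · subst hca
            right
            have := List.count_pos_iff.mpr hct
            rw [hcc]; simp; omega
        · right; rw [hcc]; omega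
    · intro h
      have key : (∃ (k : Nat) (_ : k < t.length), t[k] = c ∧ ((b ∨ c = a) ∨ c ∈ t.take k)) ∨ (c = a ∧ b) := by
        rcases h with ⟨hb, hmem⟩ | h2
        · rcases List.mem_cons.mp hmem with hca | hct
          · exact Or.inr ⟨hca, hb⟩
          · left; rw [ih]; exact Or.inl ⟨Or.inl hb, hct⟩
        · rw [hcc] at h2
          by_cases hca : c = a
          · subst hca
            rw [if_pos rfl] at h2
            have hct : c ∈ t := List.count_pos_iff.mp (by omega)
            left; rw [ih]; exact Or.inl ⟨Or.inr rfl, hct⟩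
          · left; rw [ih]; right
            have : (if a = c then (1:Nat) else 0) = 0 := by simp [Ne.symm hca]
            omega
      rcases key with ⟨k, hk, hek, hmem⟩ | ⟨hca, hb⟩
      · exact ⟨k+1, by simpa using hk, by simpa using hek, by
          simp only [List.take_succ_cons, List.mem_cons]; tauto⟩
      · exact ⟨0, by simp, hca.symm, Or.inl hb⟩

-- membership in B's duplicate list = occurring at least twice among the nucleotides
lemma mem_pvDupsList (col : List Char) (c : Char) :
    c ∈ pvDupsList col ↔ c ∈ "ACGT".toList ∧ 2 ≤ col.count c := by
  unfold pvDupsList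
  rw [List.mem_filterMap]
  constructor
  · rintro ⟨p, hp, hf⟩
    rw [PySem.List.mem_enumerate_iff] at hp
    obtain ⟨k, hk, rfl⟩ := hp
    simp only [zero_add] at hf
    split at hf
    · rename_i hcond
      obtain ⟨hin, hearly⟩ := hcond
      have hc : col[k] = c := by simpa using hf
      refine ⟨hc ▸ hin, ?_⟩
      rw [PySem.List.slice_to col (Int.natCast_nonneg k)] at hearly
      have := (pv_seen_aux c col False).mp
        ⟨k, hk, hc, Or.inr (by simpa [hc] using hearly)⟩
      simpa using this
    · simp at hf
  · rintro ⟨hin, hcnt⟩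
    have := (pv_seen_aux c col False).mpr (by simp [hcnt])
    obtain ⟨k, hk, hek, hmem⟩ := this
    simp only [false_or] at hmem
    refine ⟨((k : Int), col[k]), ?_, ?_⟩
    · rw [PySem.List.mem_enumerate_iff]; exact ⟨k, hk, by simp⟩
    · rw [if_pos]
      · simp [hek]
      · constructor
        · simpa [hek] using hin
        · show col[k] ∈ PySem.List.slice col none (some ((k:Int)))
          rw [PySem.List.slice_to col (Int.natCast_nonneg k)]
          simpa [hek] using hmem

-- the two column conditions agree at every column
lemma pvCond_eq (L : List String) (x : Int) :
    pvSixWay (pvNucCounts L x) =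
      decide (PySem.Set.len (PySem.Set.ofList (pvDupsList (L.map (fun seq => (PySem.Str.pyGet? seq x).getD ' ')))) ≥ 2) := by
  rw [show pvNucCounts L x = (((L.map (pvColChar x)).count 'A' : Int),
      ((L.map (pvColChar x)).count 'C' : Int), ((L.map (pvColChar x)).count 'G' : Int),
      ((L.map (pvColChar x)).count 'T' : Int)) from by
    simpa using pvNucCounts_foldl x L (0, 0, 0, 0)]
  have hcol : L.map (fun seq => (PySem.Str.pyGet? seq x).getD ' ') = L.map (pvColChar x) := rfl
  rw [hcol]
  set col := L.map (pvColChar x) with hcoldef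
  have hperm : (PySem.Set.ofList (pvDupsList col)).Perm
      ((['A','C','G','T'] : List Char).filter (fun n => decide (2 ≤ col.count n))) := by
    rw [List.perm_ext_iff_of_nodup (PySem.Set.nodup_ofList _)
      (List.Nodup.filter _ (by decide))]
    intro a
    rw [PySem.Set.mem_ofList, mem_pvDupsList, List.mem_filter]
    simp [show ("ACGT".toList : List Char) = ['A','C','G','T'] from rfl]
  have hlen : PySem.Set.len (PySem.Set.ofList (pvDupsList col)) =
      (((['A','C','G','T'] : List Char).filter (fun n => decide (2 ≤ col.count n))).length : Int) := by
    simp [PySem.Set.len, hperm.length_eq]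
  rw [hlen]
  by_cases hA : 2 ≤ col.count 'A' <;> by_cases hC : 2 ≤ col.count 'C' <;>
    by_cases hG : 2 ≤ col.count 'G' <;> by_cases hT : 2 ≤ col.count 'T' <;>
    simp [pvSixWay, List.filter, hA, hC, hG, hT]

-- the two programs agree on every input (Pre_ is only needed for faithfulness to Python)
lemma pv_main (L : List String) : showinform L = showinform_alt L := by
  simp only [showinform, showinform_alt]
  generalize PySem.Str.len (PySem.List.pyGetD L 0 "") = n
  -- B's keep list is the filtered range
  have hB : (PySem.List.pyRange 0 n 1).foldl (fun acc x =>
      if decide (PySem.Set.len (PySem.Set.ofList (pvDupsList (L.map (fun seq => (PySem.Str.pyGet? seq x).getD ' ')))) ≥ 2)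
      then acc ++ [x] else acc) [] =
      (PySem.List.pyRange 0 n 1).filter (fun x => pvSixWay (pvNucCounts L x)) := by
    have := PySem.List.foldl_append_if
      (fun x => decide (PySem.Set.len (PySem.Set.ofList (pvDupsList (L.map (fun seq => (PySem.Str.pyGet? seq x).getD ' ')))) ≥ 2))
      (fun x => x) (PySem.List.pyRange 0 n 1) []
    simp only [List.map_id'] at this
    rw [this, List.nil_append, List.filter_congr]
    intro x _
    exact (pvCond_eq L x).symm
  -- A's tracker is a map over the range
  have hT : (PySem.List.pyRange 0 n 1).foldl (fun tr x =>
      if pvSixWay (pvNucCounts L x) then tr ++ [(1 : Int)] else tr ++ [(0 : Int)]) [] =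
      (PySem.List.pyRange 0 n 1).map (fun x => if pvSixWay (pvNucCounts L x) then (1 : Int) else 0) := by
    have hstep : (fun (tr : List Int) x =>
        if pvSixWay (pvNucCounts L x) then tr ++ [(1 : Int)] else tr ++ [(0 : Int)]) =
        (fun tr x => tr ++ [if pvSixWay (pvNucCounts L x) then (1 : Int) else 0]) := by
      funext tr x; split <;> rfl
    rw [hstep]
    simpa using PySem.List.foldl_append_singleton_eq_map
      (fun x => if pvSixWay (pvNucCounts L x) then (1 : Int) else 0) (PySem.List.pyRange 0 n 1) []
  rw [hB, hT]
  -- A's outer loop is a map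
  rw [show (fun (out : List String) seq => out ++
      [String.ofList ((PySem.List.pyRange 0 n 1).foldl (fun s x =>
        if PySem.List.pyGetD ((PySem.List.pyRange 0 n 1).map
            (fun x => if pvSixWay (pvNucCounts L x) then (1 : Int) else 0)) x 0 == 1
        then s ++ [(PySem.Str.pyGet? seq x).getD ' '] else s) [])]) =
      (fun out seq => out ++ [(fun seq => String.ofList ((PySem.List.pyRange 0 n 1).foldl (fun s x =>
        if PySem.List.pyGetD ((PySem.List.pyRange 0 n 1).map
            (fun x => if pvSixWay (pvNucCounts L x) then (1 : Int) else 0)) x 0 == 1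
        then s ++ [(PySem.Str.pyGet? seq x).getD ' '] else s) [])) seq]) from rfl]
  rw [PySem.List.foldl_append_singleton_eq_map]
  rw [List.nil_append]
  apply List.map_congr_left
  intro seq _
  congr 1
  -- the inner character loop is B's map over the filtered range
  have := PySem.List.foldl_append_if
    (fun x => PySem.List.pyGetD ((PySem.List.pyRange 0 n 1).map
        (fun x => if pvSixWay (pvNucCounts L x) then (1 : Int) else 0)) x 0 == 1)
    (fun x => (PySem.Str.pyGet? seq x).getD ' ') (PySem.List.pyRange 0 n 1) []
  rw [this, List.nil_append, List.filter_congr]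
  intro x hx
  rw [PySem.List.mem_pyRange_one] at hx
  rw [PySem.List.pyGetD_map_pyRange_of_nonneg _ n x _ hx.1 hx.2]
  cases pvSixWay (pvNucCounts L x) <;> decide

-- ===== VERDICT (by name: the statement is the Claim_ definition above) =====
theorem showinform_spec : Claim_equal_showinform := by
  intro L _ _
  unfold Spec_showinform
  exact pv_main L
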